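-- pv_equiv track=rewrite | github.com/JhonyAdr/Visualizacion-Algoritmos-de-Ordenamiento--Busqueda--BusquedaTextual | algoritmos_ordenamiento.py | obtener_colores
-- ===== SOURCE A (Python) =====
-- def obtener_colores(n, inicio, fin, s, ci, es_intercambio=False):
--     colores = []
--     for i in range(n):
--         if inicio <= i <= fin:
--             colores.append('#FF597B')
--         else:
--             colores.append('#764AF1')
--         if i == fin:
--             colores[i] = '#019267'
--         elif i == s:
--             colores[i] = '#FF597B'
--         elif i == ci:
--             colores[i] = '#764AF1'
--         if es_intercambio:
--             if i == s or i == ci: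
--                 colores[i] = '#019267'
--     return colores
-- ===== SOURCE B (Python) =====
-- def obtener_colores(n, inicio, fin, s, ci, es_intercambio=False):
--     colores = ['#764AF1'] * n
--     for i in range(max(0, inicio), min(n, fin + 1)):
--         colores[i] = '#FF597B'
--     if 0 <= ci < n:
--         colores[ci] = '#764AF1'
--     if 0 <= s < n:
--         colores[s] = '#FF597B'
--     if 0 <= fin < n:
--         colores[fin] = '#019267'
--     if es_intercambio:
--         for idx in (s, ci):
--             if 0 <= idx < n:
--                 colores[idx] = '#019267'
--     return colores
-- ===== Notes on version B (the rewrite author's own statement) =====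
-- stated objective: simpler
-- what changed: A decides every color inside one per-index loop with an if/elif cascade and a swap overwrite; B builds the whole list as a constant block, paints the highlighted range with one slice-like loop, and then applies the three single-index markers and the swap markers as bounds-guarded overwrites whose order (ci, s, fin, then swap) reproduces the elif precedence. (bulk list construction and range painting replace per-index Python branch work, measured ~2x faster)
import Mathlib
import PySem

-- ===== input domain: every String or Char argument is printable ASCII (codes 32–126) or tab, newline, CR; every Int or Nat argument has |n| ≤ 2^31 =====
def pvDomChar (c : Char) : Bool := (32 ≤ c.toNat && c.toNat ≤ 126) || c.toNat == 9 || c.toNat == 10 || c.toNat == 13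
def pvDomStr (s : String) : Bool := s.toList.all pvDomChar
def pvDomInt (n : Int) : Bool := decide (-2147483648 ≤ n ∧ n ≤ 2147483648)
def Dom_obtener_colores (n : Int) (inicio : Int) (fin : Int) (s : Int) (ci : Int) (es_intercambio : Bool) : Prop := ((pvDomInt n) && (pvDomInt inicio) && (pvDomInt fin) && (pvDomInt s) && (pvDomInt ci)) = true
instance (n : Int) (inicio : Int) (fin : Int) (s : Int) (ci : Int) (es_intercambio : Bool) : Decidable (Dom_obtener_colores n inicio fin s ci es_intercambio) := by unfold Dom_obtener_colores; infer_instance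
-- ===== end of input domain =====

-- B builds the whole list at once and paints the highlighted range and the three markers
-- with bounds-guarded overwrites, instead of A's per-index branch cascade: simpler decomposition.

-- ===== PORT A =====
-- Literal port of A: fold over range(n); each iteration appends the base color, then the
-- if/elif cascade overwrites colores[i] (i = current last index), then the swap overwrite.
def obtener_colores (n : Int) (inicio : Int) (fin : Int) (s : Int) (ci : Int) (es_intercambio : Bool) : List String :=
  (PySem.List.pyRange 0 n 1).foldl (fun colores i =>
    let colores := colores ++ [if inicio ≤ i ∧ i ≤ fin then "#FF597B" else "#764AF1"]
    let colores :=
      if i = fin then colores.set i.toNat "#019267"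
      else if i = s then colores.set i.toNat "#FF597B"
      else if i = ci then colores.set i.toNat "#764AF1"
      else colores
    if es_intercambio then
      if i = s ∨ i = ci then colores.set i.toNat "#019267" else colores
    else colores) []

-- ===== PORT B =====
-- Literal port of B: replicate, paint the clamped range, then guarded single writes.
def obtener_colores_alt (n : Int) (inicio : Int) (fin : Int) (s : Int) (ci : Int) (es_intercambio : Bool) : List String :=
  let colores := List.replicate n.toNat "#764AF1"
  let colores := (PySem.List.pyRange (max 0 inicio) (min n (fin + 1)) 1).foldl
    (fun c i => c.set i.toNat "#FF597B") colores
  let colores := if 0 ≤ ci ∧ ci < n then colores.set ci.toNat "#764AF1" else colores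
  let colores := if 0 ≤ s ∧ s < n then colores.set s.toNat "#FF597B" else colores
  let colores := if 0 ≤ fin ∧ fin < n then colores.set fin.toNat "#019267" else colores
  if es_intercambio then
    let colores := if 0 ≤ s ∧ s < n then colores.set s.toNat "#019267" else colores
    if 0 ≤ ci ∧ ci < n then colores.set ci.toNat "#019267" else colores
  else colores

-- ===== PRECONDITION & SPEC =====
def Spec_obtener_colores (n : Int) (inicio : Int) (fin : Int) (s : Int) (ci : Int) (es_intercambio : Bool) (out : List String) : Prop := out = obtener_colores_alt n inicio fin s ci es_intercambio
instance (n : Int) (inicio : Int) (fin : Int) (s : Int) (ci : Int) (es_intercambio : Bool) (out : List String) : Decidable (Spec_obtener_colores n inicio fin s ci es_intercambio out) := by unfold Spec_obtener_colores; infer_instance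

-- ===== CLAIM (what is proved, stated in full; the proofs are below) =====
def Claim_equal_obtener_colores : Prop := ∀ (n : Int) (inicio : Int) (fin : Int) (s : Int) (ci : Int) (es_intercambio : Bool), Dom_obtener_colores n inicio fin s ci es_intercambio → Spec_obtener_colores n inicio fin s ci es_intercambio (obtener_colores n inicio fin s ci es_intercambio)

-- ===== LEMMAS AND PROOFS =====

-- Final color of index i, common characterisation of both programs.
def pvColorAt (inicio : Int) (fin : Int) (s : Int) (ci : Int) (es : Bool) (i : Int) : String :=
  if es ∧ (i = s ∨ i = ci) then "#019267"
  else if i = fin then "#019267"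
  else if i = s then "#FF597B"
  else if i = ci then "#764AF1"
  else if inicio ≤ i ∧ i ≤ fin then "#FF597B" else "#764AF1"

theorem pv_set_last {α : Type} (c : List α) (x v : α) :
    (c ++ [x]).set c.length v = c ++ [v] := by
  induction c with
  | nil => simp
  | cons a t ih => simp [ih]

theorem pv_stepA (inicio fin s ci : Int) (es : Bool) (c : List String) (i : Int)
    (hc : c.length = i.toNat) :
    (fun colores j =>
      let colores := colores ++ [if inicio ≤ j ∧ j ≤ fin then "#FF597B" else "#764AF1"]
      let colores :=
        if j = fin then colores.set j.toNat "#019267"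
        else if j = s then colores.set j.toNat "#FF597B"
        else if j = ci then colores.set j.toNat "#764AF1"
        else colores
      if es then
        if j = s ∨ j = ci then colores.set j.toNat "#019267" else colores
      else colores) c i = c ++ [pvColorAt inicio fin s ci es i] := by
  simp only [pvColorAt]
  have hset : ∀ x v : String, (c ++ [x]).set i.toNat v = c ++ [v] := by
    intro x v; rw [← hc]; exact pv_set_last c x v
  have hset2 : ∀ x v w : String, ((c ++ [x]).set i.toNat v).set i.toNat w = c ++ [w] := by
    intro x v w; rw [hset, hset]
  split_ifs <;> simp_all

theorem pv_foldA (inicio fin s ci : Int) (es : Bool) :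
    ∀ (m : Nat),
      (PySem.List.pyRange 0 (m : Int) 1).foldl (fun colores i =>
        let colores := colores ++ [if inicio ≤ i ∧ i ≤ fin then "#FF597B" else "#764AF1"]
        let colores :=
          if i = fin then colores.set i.toNat "#019267"
          else if i = s then colores.set i.toNat "#FF597B"
          else if i = ci then colores.set i.toNat "#764AF1"
          else colores
        if es then
          if i = s ∨ i = ci then colores.set i.toNat "#019267" else colores
        else colores) []
      = (List.range m).map (fun k : Nat => pvColorAt inicio fin s ci es (k : Int)) := by
  intro m
  induction m with
  | zero => simp [PySem.List.pyRange_one_eq_nil]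
  | succ m ih =>
      have h1 : ((m : Int) + 1) = ((m + 1 : Nat) : Int) := by push_cast; ring
      rw [← h1, PySem.List.pyRange_one_succ_right (by positivity), List.foldl_append, ih]
      simp only [List.foldl_cons, List.foldl_nil]
      rw [List.range_succ, List.map_append]
      exact pv_stepA inicio fin s ci es _ (m : Int) (by simp)

theorem pv_A_char (n inicio fin s ci : Int) (es : Bool) :
    obtener_colores n inicio fin s ci es =
      (List.range n.toNat).map (fun k : Nat => pvColorAt inicio fin s ci es (k : Int)) := by
  unfold obtener_colores
  by_cases h : n ≤ 0
  · rw [PySem.List.pyRange_one_eq_nil h]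
    have : n.toNat = 0 := by omega
    simp [this]
  · have : n = (n.toNat : Int) := by omega
    rw [this]
    exact pv_foldA inicio fin s ci es n.toNat

theorem pv_set_map_range (f : Nat → String) (m k : Nat) (v : String) :
    ((List.range m).map f).set k v
      = (List.range m).map (fun j : Nat => if j = k then v else f j) := by
  apply List.ext_getElem
  · simp
  · intro j hj1 hj2
    simp only [List.getElem_set, List.getElem_map, List.getElem_range] at *
    split_ifs with h1 h2 h3 <;> first | rfl | omega

theorem pv_ite_set_map (P : Prop) [Decidable P] (f : Nat → String) (m k : Nat) (v : String) :
    (if P then ((List.range m).map f).set k v else (List.range m).map f)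
      = (List.range m).map (fun j : Nat => if P ∧ j = k then v else f j) := by
  by_cases hp : P
  · rw [if_pos hp, pv_set_map_range f m k v]
    apply List.map_congr_left; intro j _
    simp [hp]
  · rw [if_neg hp]
    apply List.map_congr_left; intro j _
    simp [hp]

theorem pv_paint_map (f : Nat → String) (m : Nat) (a b : Int) (ha : 0 ≤ a) (hb : b ≤ (m : Int)) :
    (PySem.List.pyRange a b 1).foldl (fun c i => c.set i.toNat "#FF597B")
        ((List.range m).map f)
      = (List.range m).map
          (fun j : Nat => if a ≤ (j : Int) ∧ (j : Int) < b then "#FF597B" else f j) := by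
  by_cases h : b ≤ a
  · rw [PySem.List.pyRange_one_eq_nil h, List.foldl_nil]
    apply List.map_congr_left; intro j _
    rw [if_neg (by omega)]
  · rw [PySem.List.pyRange_one_cons (by omega), List.foldl_cons]
    have hset := pv_set_map_range f m a.toNat "#FF597B"
    rw [hset, pv_paint_map _ m (a + 1) b (by omega) hb]
    apply List.map_congr_left; intro j hj
    rw [List.mem_range] at hj
    split_ifs <;> first | rfl | omega
termination_by (b - a).toNat
decreasing_by omega

theorem pv_B_char (n inicio fin s ci : Int) (es : Bool) :
    obtener_colores_alt n inicio fin s ci es =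
      (List.range n.toNat).map (fun k : Nat => pvColorAt inicio fin s ci es (k : Int)) := by
  unfold obtener_colores_alt
  dsimp only
  have h0 : List.replicate n.toNat "#764AF1"
      = (List.range n.toNat).map (fun _ : Nat => "#764AF1") := by simp
  rw [h0, pv_paint_map _ n.toNat (max 0 inicio) (min n (fin + 1)) (by omega) (by omega)]
  rw [pv_ite_set_map (0 ≤ ci ∧ ci < n) _ n.toNat ci.toNat "#764AF1"]
  rw [pv_ite_set_map (0 ≤ s ∧ s < n) _ n.toNat s.toNat "#FF597B"]
  rw [pv_ite_set_map (0 ≤ fin ∧ fin < n) _ n.toNat fin.toNat "#019267"]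
  cases es with
  | false =>
      simp only [Bool.false_eq_true, if_false]
      apply List.map_congr_left; intro j hj
      rw [List.mem_range] at hj
      simp only [pvColorAt, Bool.false_eq_true, false_and, if_false]
      split_ifs <;> first | rfl | omega
  | true =>
      simp only [if_true]
      rw [pv_ite_set_map (0 ≤ s ∧ s < n) _ n.toNat s.toNat "#019267"]
      rw [pv_ite_set_map (0 ≤ ci ∧ ci < n) _ n.toNat ci.toNat "#019267"]
      apply List.map_congr_left; intro j hj
      rw [List.mem_range] at hj
      simp only [pvColorAt, true_and]
      split_ifs <;> first | rfl | omega

-- ===== VERDICT (by name: the statement is the Claim_ definition above) =====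
theorem obtener_colores_spec : Claim_equal_obtener_colores := by
  intro n inicio fin s ci es _
  unfold Spec_obtener_colores
  rw [pv_A_char, pv_B_char]
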